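-- pv_equiv track=rewrite | github.com/yogan/advent-of-code | 2025/day-09-python/aoc.py | solve
-- ===== SOURCE A (Python) =====
-- def solve(positions):
--     p1, p2 = 0, 0
--     h_edges, v_edges = edges(positions)
--
--     for c1, r1 in positions:
--         for c2, r2 in positions:
--             if c1 == c2 or r1 == r2:
--                 continue
--
--             area = (abs(c2 - c1) + 1) * (abs(r2 - r1) + 1)
--             p1 = max(p1, area)
--
--             if area < p2:
--                 continue
--
--             rectangle = (min(c1, c2), max(c1, c2), min(r1, r2), max(r1, r2))
--             if any(inside((c1, r), (c2, r), rectangle) for r, c1, c2 in h_edges):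
--                 continue
--             if any(inside((c, r1), (c, r2), rectangle) for c, r1, r2 in v_edges):
--                 continue
--
--             p2 = area
--
--     return p1, p2
--
-- def edges(positions):
--     h_edges, v_edges = [], []
--     c1, r1 = positions[0]
--
--     for c2, r2 in positions[1:] + [positions[0]]:
--         if r1 == r2:
--             h_edges.append((r1, min(c1, c2), max(c1, c2)))
--         elif c1 == c2:
--             v_edges.append((c1, min(r1, r2), max(r1, r2)))
--         else:
--             raise ValueError("non-rectangulary detected")
--
--         r1, c1 = r2, c2
--
--     return h_edges, v_edges
--
-- def inside(p1, p2, rectangle):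
--     (c1, r1), (c2, r2) = p1, p2
--     c_min, c_max, r_min, r_max = rectangle
--
--     if r1 == r2:
--         return r_min < r1 < r_max and c1 < c_max and c_min < c2
--     elif c1 == c2:
--         return c_min < c1 < c_max and r1 < r_max and r_min < r2
-- ===== SOURCE B (Python) =====
-- def edges(positions):
--     h_edges, v_edges = [], []
--     c1, r1 = positions[0]
--
--     for c2, r2 in positions[1:] + [positions[0]]:
--         if r1 == r2:
--             h_edges.append((r1, min(c1, c2), max(c1, c2)))
--         elif c1 == c2:
--             v_edges.append((c1, min(r1, r2), max(r1, r2)))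
--         else:
--             raise ValueError("non-rectangulary detected")
--
--         r1, c1 = r2, c2
--
--     return h_edges, v_edges
--
--
-- def inside(p1, p2, rectangle):
--     (c1, r1), (c2, r2) = p1, p2
--     c_min, c_max, r_min, r_max = rectangle
--
--     if r1 == r2:
--         return r_min < r1 < r_max and c1 < c_max and c_min < c2
--     elif c1 == c2:
--         return c_min < c1 < c_max and r1 < r_max and r_min < r2
--
--
-- def solve(positions):
--     h_edges, v_edges = edges(positions)
--
--     # every candidate rectangle, tagged with its area
--     candidates = [((abs(c2 - c1) + 1) * (abs(r2 - r1) + 1),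
--                    (min(c1, c2), max(c1, c2), min(r1, r2), max(r1, r2)))
--                   for c1, r1 in positions
--                   for c2, r2 in positions
--                   if c1 != c2 and r1 != r2]
--
--     p1 = max((a for a, _ in candidates), default=0)
--
--     # best-first scan: the first edge-free rectangle in descending-area order wins
--     p2 = 0
--     for a, rect in sorted(candidates, key=lambda t: t[0], reverse=True):
--         if any(inside((x1, r), (x2, r), rect) for r, x1, x2 in h_edges):
--             continue
--         if any(inside((c, y1), (c, y2), rect) for c, y1, y2 in v_edges):
--             continue
--         p2 = a
--         break
--
--     return p1, p2
-- ===== Notes on version B (the rewrite author's own statement) =====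
-- stated objective: alternative
-- what changed: Replaces A's single interleaved pass with running maxima and the 'area < p2' prune by materialising all (area, rectangle) candidates once, taking p1 as a plain max over the areas, and computing p2 best-first: sort the candidates by area descending and return the first edge-free rectangle's area (0 if none).
import Mathlib
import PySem

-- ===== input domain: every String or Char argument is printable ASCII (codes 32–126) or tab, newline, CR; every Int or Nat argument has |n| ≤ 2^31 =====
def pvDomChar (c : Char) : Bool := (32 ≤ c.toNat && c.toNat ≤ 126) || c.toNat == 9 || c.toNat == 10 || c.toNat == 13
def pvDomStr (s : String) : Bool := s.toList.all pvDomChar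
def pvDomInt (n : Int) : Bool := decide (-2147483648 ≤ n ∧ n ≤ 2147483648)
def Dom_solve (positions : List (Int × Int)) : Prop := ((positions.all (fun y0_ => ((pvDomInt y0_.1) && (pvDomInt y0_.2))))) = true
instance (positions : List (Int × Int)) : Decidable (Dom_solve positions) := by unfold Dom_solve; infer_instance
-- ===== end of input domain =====

-- B builds the (area, rectangle) candidate list once, takes p1 as a plain max over
-- the areas, and finds p2 best-first (sort by area descending, first edge-free hit),
-- replacing A's interleaved running-max pass with the `area < p2` prune; objective:
-- alternative. Equivalence is about the return value; on inputs where the Python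
-- raises (empty / non-rectilinear path, excluded by Pre_solve) the ports return
-- the junk default (0, 0).

-- ===== PORT A =====
-- shared helper: Python `edges` (both Source A and Source B contain the identical function);
-- `none` is exactly where Python raises (IndexError on [], ValueError otherwise)
def edgesGo (c1 r1 : Int) (l : List (Int × Int))
    (hE vE : List (Int × Int × Int)) :
    Option (List (Int × Int × Int) × List (Int × Int × Int)) :=
  match l with
  | [] => some (hE, vE)
  | (c2, r2) :: rest =>
    if r1 = r2 then
      edgesGo c2 r2 rest (hE ++ [(r1, min c1 c2, max c1 c2)]) vE
    else if c1 = c2 then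
      edgesGo c2 r2 rest hE (vE ++ [(c1, min r1 r2, max r1 r2)])
    else none

def edgesPy (positions : List (Int × Int)) :
    Option (List (Int × Int × Int) × List (Int × Int × Int)) :=
  match positions with
  | [] => none
  | (c1, r1) :: rest => edgesGo c1 r1 (rest ++ [(c1, r1)]) [] []

-- shared helper: Python `inside` (returns None on the fall-through branch, which
-- `any` treats as False; ported as `false`)
def insidePy (p1 p2 : Int × Int) (rect : Int × Int × Int × Int) : Bool :=
  let (c1, r1) := p1
  let (c2, r2) := p2
  let (cmin, cmax, rmin, rmax) := rect
  if r1 = r2 then decide (rmin < r1 ∧ r1 < rmax ∧ c1 < cmax ∧ cmin < c2)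
  else if c1 = c2 then decide (cmin < c1 ∧ c1 < cmax ∧ r1 < rmax ∧ rmin < r2)
  else false

-- one iteration of A's inner loop body (named helper for the inline code)
def stepA (hE vE : List (Int × Int × Int)) (st : Int × Int)
    (p q : Int × Int) : Int × Int :=
  if p.1 = q.1 ∨ p.2 = q.2 then st
  else
    let area := (|q.1 - p.1| + 1) * (|q.2 - p.2| + 1)
    let p1' := max st.1 area
    if area < st.2 then (p1', st.2)
    else
      let rect := (min p.1 q.1, max p.1 q.1, min p.2 q.2, max p.2 q.2)
      if hE.any (fun e => insidePy (e.2.1, e.1) (e.2.2, e.1) rect) then (p1', st.2)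
      else if vE.any (fun e => insidePy (e.1, e.2.1) (e.1, e.2.2) rect) then (p1', st.2)
      else (p1', area)

def solve (positions : List (Int × Int)) : Int × Int :=
  match edgesPy positions with
  | none => (0, 0)
  | some (hE, vE) =>
    positions.foldl
      (fun st p => positions.foldl (fun st2 q => stepA hE vE st2 p q) st)
      (0, 0)

-- ===== PORT B =====
-- Source B's rectangle of a corner pair
def rectOf (p q : Int × Int) : Int × Int × Int × Int :=
  (min p.1 q.1, max p.1 q.1, min p.2 q.2, max p.2 q.2)

-- Source B's area expression
def areaB (pq : (Int × Int) × (Int × Int)) : Int :=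
  (|pq.2.1 - pq.1.1| + 1) * (|pq.2.2 - pq.1.2| + 1)

-- Source B's loop body test: neither edge family crosses the rectangle
def okR (hE vE : List (Int × Int × Int)) (rect : Int × Int × Int × Int) : Bool :=
  !(hE.any (fun e => insidePy (e.2.1, e.1) (e.2.2, e.1) rect)) &&
  !(vE.any (fun e => insidePy (e.1, e.2.1) (e.1, e.2.2) rect))

-- `max(gen, default=0)` is ported as foldl max 0 (every listed area is positive, so
-- the 0 seed never changes a non-empty maximum); the for/continue/break scan over
-- the sorted candidates is List.find?
def solve_alt (positions : List (Int × Int)) : Int × Int :=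
  match edgesPy positions with
  | none => (0, 0)
  | some (hE, vE) =>
    let cands := positions.flatMap (fun p =>
      (positions.filter (fun q => p.1 != q.1 && p.2 != q.2)).map
        (fun q => (areaB (p, q), rectOf p q)))
    let p1 := (cands.map Prod.fst).foldl max 0
    let p2 :=
      match (PySem.List.sorted cands (fun t => t.1) true).find?
          (fun t => okR hE vE t.2) with
      | some t => t.1
      | none => 0
    (p1, p2)

-- ===== PRECONDITION & SPEC =====
-- Pre_ excludes exactly the inputs where Python A raises: the empty list
-- (IndexError) and lists whose cyclic walk has a step changing both coordinates
-- (ValueError "non-rectangulary detected").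
def Pre_solve (positions : List (Int × Int)) : Prop :=
  positions ≠ [] ∧
  List.IsChain (fun a b : Int × Int => a.2 = b.2 ∨ a.1 = b.1)
    (positions ++ positions.take 1)
instance (positions : List (Int × Int)) : Decidable (Pre_solve positions) := by
  unfold Pre_solve; infer_instance

def pvWitness_solve : (List (Int × Int)) := [(0, 0), (4, 0), (4, 3), (0, 3)]

def Spec_solve (positions : List (Int × Int)) (out : Int × Int) : Prop := out = solve_alt positions
instance (positions : List (Int × Int)) (out : Int × Int) : Decidable (Spec_solve positions out) := by unfold Spec_solve; infer_instance

-- ===== CLAIM (what is proved, stated in full; the proofs are below) =====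
def Claim_equal_solve : Prop := ∀ (positions : List (Int × Int)), Dom_solve positions → Pre_solve positions → Spec_solve positions (solve positions)

-- ===== LEMMAS AND PROOFS =====

-- A's loop body in componentwise normal form: the `area < p2` prune never changes
-- the value, because then max p2 area = p2 anyway
set_option maxHeartbeats 1000000 in
theorem stepA_norm (hE vE : List (Int × Int × Int)) (st : Int × Int) (p q : Int × Int) :
    stepA hE vE st p q =
      (if p.1 != q.1 && p.2 != q.2 then max st.1 (areaB (p, q)) else st.1,
       if (p.1 != q.1 && p.2 != q.2) && okR hE vE (rectOf p q) then max st.2 (areaB (p, q)) else st.2) := by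
  by_cases h : p.1 = q.1 ∨ p.2 = q.2
  · have hv : (p.1 != q.1 && p.2 != q.2) = false := by
      rcases h with h | h <;> simp [h]
    simp only [stepA, if_pos h, hv, Bool.false_and, Bool.false_eq_true, if_false]
  · have hv : (p.1 != q.1 && p.2 != q.2) = true := by
      simp only [Bool.and_eq_true, bne_iff_ne]
      exact not_or.mp h
    unfold stepA okR rectOf areaB
    rw [if_neg h]
    by_cases hH : (hE.any fun e => insidePy (e.2.1, e.1) (e.2.2, e.1)
        (min p.1 q.1, max p.1 q.1, min p.2 q.2, max p.2 q.2)) = true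
    · simp only [hv, hH, Bool.true_and, if_true]
      split_ifs <;> simp_all
    · by_cases hV : (vE.any fun e => insidePy (e.1, e.2.1) (e.1, e.2.2)
          (min p.1 q.1, max p.1 q.1, min p.2 q.2, max p.2 q.2)) = true
      · simp only [hv, hH, hV, Bool.true_and]
        split_ifs
        all_goals simp_all
      · simp only [hv, hH, hV, Bool.true_and]
        split_ifs with h1 <;> simp_all
        omega

-- a fold of a componentwise step splits into two independent folds
theorem foldl_pair_split {α : Type} (f g : Int → α → Int) (l : List α) (ab : Int × Int) :
    l.foldl (fun st x => (f st.1 x, g st.2 x)) ab = (l.foldl f ab.1, l.foldl g ab.2) := by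
  induction l generalizing ab with
  | nil => rfl
  | cons x xs ih => simp [List.foldl_cons, ih]

-- a guarded running max equals foldl max over the filtered, mapped list
theorem foldl_guard_max {α : Type} (P : α → Bool) (f : α → Int) (l : List α) (a : Int) :
    l.foldl (fun a x => if P x then max a (f x) else a) a
      = ((l.filter P).map f).foldl max a := by
  induction l generalizing a with
  | nil => rfl
  | cons x xs ih =>
    by_cases h : P x <;> simp [List.foldl_cons, h, ih]

-- foldl over a flatMap is the nested foldl
theorem foldl_flatMap' {α β γ : Type} (f : α → List β) (g : γ → β → γ) (l : List α) (a : γ) :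
    (l.flatMap f).foldl g a = l.foldl (fun a x => (f x).foldl g a) a := by
  induction l generalizing a with
  | nil => rfl
  | cons x xs ih => simp [List.flatMap_cons, List.foldl_append, ih]

-- the first find?-hit of a list sorted by descending first component has the
-- maximal first component among all hits
theorem find?_pairwise_first_max {β : Type} (P : Int × β → Bool) (l : List (Int × β))
    (x : Int × β) (hp : l.Pairwise (fun a b => b.1 ≤ a.1)) (hf : l.find? P = some x) :
    ∀ y ∈ l, P y → y.1 ≤ x.1 := by
  induction l with
  | nil => simp at hf
  | cons a t ih =>
    rw [List.pairwise_cons] at hp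
    by_cases ha : P a
    · rw [List.find?_cons_of_pos ha] at hf
      cases hf
      intro y hy _
      rcases List.mem_cons.mp hy with rfl | hy
      · exact le_refl _
      · exact hp.1 y hy
    · rw [List.find?_cons_of_neg ha] at hf
      intro y hy hPy
      rcases List.mem_cons.mp hy with rfl | hy
      · exact absurd hPy ha
      · exact ih hp.2 hf y hy hPy

-- every candidate's area is nonnegative
theorem cands_fst_nonneg (positions : List (Int × Int)) (t : Int × Int × Int × Int × Int)
    (ht : t ∈ positions.flatMap (fun p =>
      (positions.filter (fun q => p.1 != q.1 && p.2 != q.2)).map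
        (fun q => (areaB (p, q), rectOf p q)))) : 0 ≤ t.1 := by
  rw [List.mem_flatMap] at ht
  obtain ⟨p, _, ht⟩ := ht
  rw [List.mem_map] at ht
  obtain ⟨q, _, rfl⟩ := ht
  have h1 : (0 : Int) ≤ |q.1 - p.1| := abs_nonneg _
  have h2 : (0 : Int) ≤ |q.2 - p.2| := abs_nonneg _
  simp only [areaB]
  positivity

-- foldl max 0 of a list whose maximum element m is known
theorem foldl_max_eq_of_bounds (l : List Int) (m : Int) (hm : m ∈ l)
    (hub : ∀ y ∈ l, y ≤ m) (h0 : 0 ≤ m) : l.foldl max 0 = m := by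
  apply le_antisymm
  · rcases PySem.List.foldl_max_mem l 0 with h | h
    · rw [h]; exact h0
    · exact hub _ h
  · exact (PySem.List.le_foldl_max l 0).2 m hm

theorem solve_eq_alt (positions : List (Int × Int)) :
    solve positions = solve_alt positions := by
  unfold solve solve_alt
  cases hE : edgesPy positions with
  | none => rfl
  | some hv =>
    obtain ⟨hEs, vEs⟩ := hv
    simp only
    set cands := positions.flatMap (fun p =>
      (positions.filter (fun q => p.1 != q.1 && p.2 != q.2)).map
        (fun q => (areaB (p, q), rectOf p q))) with hcands
    -- A's double fold splits componentwise (after normalising the step)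
    have hA :
        positions.foldl
          (fun st p => positions.foldl (fun st2 q => stepA hEs vEs st2 p q) st) (0, 0)
        = (positions.foldl (fun a p => positions.foldl
              (fun a q => if p.1 != q.1 && p.2 != q.2 then max a (areaB (p, q)) else a) a) 0,
           positions.foldl (fun a p => positions.foldl
              (fun a q => if (p.1 != q.1 && p.2 != q.2) && okR hEs vEs (rectOf p q) then max a (areaB (p, q)) else a) a) 0) := by
      have hinner : ∀ (p : Int × Int) (st : Int × Int),
          positions.foldl (fun st2 q => stepA hEs vEs st2 p q) st
            = (positions.foldl (fun a q => if p.1 != q.1 && p.2 != q.2 then max a (areaB (p, q)) else a) st.1 ,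
               positions.foldl (fun a q => if (p.1 != q.1 && p.2 != q.2) && okR hEs vEs (rectOf p q) then max a (areaB (p, q)) else a) st.2) := by
        intro p st
        calc positions.foldl (fun st2 q => stepA hEs vEs st2 p q) st
            = positions.foldl (fun st2 q =>
                ((if p.1 != q.1 && p.2 != q.2 then max st2.1 (areaB (p, q)) else st2.1),
                 (if (p.1 != q.1 && p.2 != q.2) && okR hEs vEs (rectOf p q) then max st2.2 (areaB (p, q)) else st2.2))) st := by
              congr 1; funext st2 q; exact stepA_norm hEs vEs st2 p q
          _ = _ := foldl_pair_split
                (fun a q => if p.1 != q.1 && p.2 != q.2 then max a (areaB (p, q)) else a)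
                (fun a q => if (p.1 != q.1 && p.2 != q.2) && okR hEs vEs (rectOf p q) then max a (areaB (p, q)) else a)
                positions st
      calc positions.foldl
            (fun st p => positions.foldl (fun st2 q => stepA hEs vEs st2 p q) st) (0, 0)
          = positions.foldl (fun st p =>
              (positions.foldl (fun a q => if p.1 != q.1 && p.2 != q.2 then max a (areaB (p, q)) else a) st.1,
               positions.foldl (fun a q => if (p.1 != q.1 && p.2 != q.2) && okR hEs vEs (rectOf p q) then max a (areaB (p, q)) else a) st.2)) (0, 0) := by
            congr 1; funext st p; exact hinner p st
        _ = _ := foldl_pair_split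
              (fun a p => positions.foldl (fun a q => if p.1 != q.1 && p.2 != q.2 then max a (areaB (p, q)) else a) a)
              (fun a p => positions.foldl (fun a q => if (p.1 != q.1 && p.2 != q.2) && okR hEs vEs (rectOf p q) then max a (areaB (p, q)) else a) a)
              positions (0, 0)
    rw [hA]
    -- A's p2 component as foldl max 0 over the filtered candidate list
    have hA2 :
        positions.foldl (fun a p => positions.foldl
            (fun a q => if (p.1 != q.1 && p.2 != q.2) && okR hEs vEs (rectOf p q) then max a (areaB (p, q)) else a) a) 0
          = ((cands.filter (fun t => okR hEs vEs t.2)).map Prod.fst).foldl max 0 := by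
      rw [hcands, List.filter_flatMap, List.map_flatMap, foldl_flatMap']
      congr 1; funext a p
      rw [List.filter_map, List.map_map, List.filter_filter]
      have := foldl_guard_max
        (fun q : Int × Int => (p.1 != q.1 && p.2 != q.2) && okR hEs vEs (rectOf p q))
        (fun q => areaB (p, q)) positions a
      rw [this]
      simp only [Function.comp_def]
      congr 2
      apply List.filter_congr
      intro q _
      exact Bool.and_comm _ _
    congr 1
    · -- p1 component
      rw [hcands, List.map_flatMap, foldl_flatMap']
      congr 1; funext a p
      rw [List.map_map]
      have := foldl_guard_max (fun q : Int × Int => p.1 != q.1 && p.2 != q.2)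
        (fun q => areaB (p, q)) positions a
      simpa [Function.comp_def] using this
    · -- p2 component: A's running max = B's best-first scan
      rw [hA2]
      set s := PySem.List.sorted cands (fun t => t.1) true with hs
      cases hf : s.find? (fun t => okR hEs vEs t.2) with
      | none =>
        simp only
        have hnone : ∀ t ∈ cands, ¬ (okR hEs vEs t.2 = true) := by
          intro t ht
          have : t ∈ s := (PySem.List.mem_sorted cands (fun t => t.1) true t).mpr ht
          exact by simpa using List.find?_eq_none.mp hf t this
        have : cands.filter (fun t => okR hEs vEs t.2) = [] := by
          rw [List.filter_eq_nil_iff]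
          exact hnone
        rw [this]; rfl
      | some x =>
        simp only
        have hperm : s.Perm cands := PySem.List.sorted_perm cands (fun t => t.1) true
        have hxs : x ∈ s := List.mem_of_find?_eq_some hf
        have hPx : okR hEs vEs x.2 = true := by
          have := List.find?_some hf
          simpa using this
        have hxc : x ∈ cands := hperm.mem_iff.mp hxs
        have hpw : s.Pairwise (fun a b => b.1 ≤ a.1) :=
          PySem.List.sorted_pairwise_rev cands (fun t => t.1)
        have hub : ∀ y ∈ cands, okR hEs vEs y.2 = true → y.1 ≤ x.1 := by
          intro y hy hPy
          exact find?_pairwise_first_max _ s x hpw hf y (hperm.mem_iff.mpr hy) hPy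
        apply foldl_max_eq_of_bounds
        · rw [List.mem_map]
          exact ⟨x, List.mem_filter.mpr ⟨hxc, hPx⟩, rfl⟩
        · intro y hy
          rw [List.mem_map] at hy
          obtain ⟨t, ht, rfl⟩ := hy
          rw [List.mem_filter] at ht
          exact hub t ht.1 ht.2
        · exact cands_fst_nonneg positions x hxc

-- ===== VERDICT (by name: the statement is the Claim_ definition above) =====
theorem solve_spec : Claim_equal_solve := by
  intro positions _ _
  unfold Spec_solve
  exact solve_eq_alt positions
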